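-- pv_equiv track=rewrite | github.com/MarkEWaite/docker-lfs | docker_build.py | get_predecessor_branch
-- ===== SOURCE A (Python) =====
-- def get_predecessor_branch(current_branch, all_branches):
--     last = "upstream/" + current_branch
--     if current_branch == "lts":
--         last = "upstream/master"
--     if current_branch == "cjd":
--         last = "cjd"
--     if current_branch == "cjt":
--         last = "cjt"
--     if current_branch == "cjp":
--         last = "cjp"
--     for branch in all_branches:
--         if branch == current_branch:
--             return last
--         if current_branch.startswith(branch):
--             last = branch
--     return last
-- ===== SOURCE B (Python) =====
-- def get_predecessor_branch(current_branch, all_branches):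
--     if current_branch == "lts":
--         default = "upstream/master"
--     elif current_branch in ("cjd", "cjt", "cjp"):
--         default = current_branch
--     else:
--         default = "upstream/" + current_branch
--     try:
--         cut = all_branches.index(current_branch)
--     except ValueError:
--         cut = len(all_branches)
--     matches = [b for b in all_branches[:cut] if current_branch.startswith(b)]
--     return matches[-1] if matches else default
-- ===== Notes on version B (the rewrite author's own statement) =====
-- stated objective: alternative
-- what changed: Replaces A's single stateful scan (accumulator with early return) by a two-phase decomposition: compute the default from the special-case table, cut the list at the first occurrence of current_branch via list.index, filter the prefix-matching branches in that slice, and return the last match or the default.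
import Mathlib
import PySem

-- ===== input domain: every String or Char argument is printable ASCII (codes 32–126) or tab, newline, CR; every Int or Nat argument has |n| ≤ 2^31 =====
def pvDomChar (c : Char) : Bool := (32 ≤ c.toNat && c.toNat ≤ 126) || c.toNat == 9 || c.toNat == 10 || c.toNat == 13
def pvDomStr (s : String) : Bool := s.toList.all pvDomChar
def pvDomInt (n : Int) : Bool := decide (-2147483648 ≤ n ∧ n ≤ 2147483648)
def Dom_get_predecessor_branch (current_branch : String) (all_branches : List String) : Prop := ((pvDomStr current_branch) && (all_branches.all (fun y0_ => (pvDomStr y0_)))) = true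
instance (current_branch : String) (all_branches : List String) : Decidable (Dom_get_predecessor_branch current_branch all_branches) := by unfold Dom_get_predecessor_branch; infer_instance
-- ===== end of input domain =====

-- B replaces A's single stateful scan by a two-phase decomposition (default table, cut at first
-- occurrence, last prefix match in the slice); objective: alternative, same cost.

-- ===== PORT A =====
-- the for-loop of A: state is `last`; early return on branch == current_branch
def pvLoopA (cb : String) : List String → String → String
  | [], last => last
  | b :: rest, last =>
    if b = cb then last
    else if PySem.Str.startswith cb b then pvLoopA cb rest b
    else pvLoopA cb rest last

def get_predecessor_branch (current_branch : String) (all_branches : List String) : String :=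
  let last := "upstream/" ++ current_branch
  let last := if current_branch = "lts" then "upstream/master" else last
  let last := if current_branch = "cjd" then "cjd" else last
  let last := if current_branch = "cjt" then "cjt" else last
  let last := if current_branch = "cjp" then "cjp" else last
  pvLoopA current_branch all_branches last

-- ===== PORT B =====
def get_predecessor_branch_alt (current_branch : String) (all_branches : List String) : String :=
  let dflt :=
    if current_branch = "lts" then "upstream/master"
    else if current_branch = "cjd" ∨ current_branch = "cjt" ∨ current_branch = "cjp" then current_branch
    else "upstream/" ++ current_branch
  -- try: all_branches.index(current_branch) except ValueError: len(all_branches)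
  let cut : Nat := (PySem.List.index? all_branches current_branch).getD all_branches.length
  let pymatches := (PySem.List.slice all_branches none (some (cut : Int))).filter
      (fun b => PySem.Str.startswith current_branch b)
  -- pymatches[-1] if pymatches else dflt
  (pymatches.getLast?).getD dflt

-- ===== PRECONDITION & SPEC =====
def Spec_get_predecessor_branch (current_branch : String) (all_branches : List String) (out : String) : Prop := out = get_predecessor_branch_alt current_branch all_branches
instance (current_branch : String) (all_branches : List String) (out : String) : Decidable (Spec_get_predecessor_branch current_branch all_branches out) := by unfold Spec_get_predecessor_branch; infer_instance

-- ===== CLAIM (what is proved, stated in full; the proofs are below) =====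
def Claim_equal_get_predecessor_branch : Prop := ∀ (current_branch : String) (all_branches : List String), Dom_get_predecessor_branch current_branch all_branches → Spec_get_predecessor_branch current_branch all_branches (get_predecessor_branch current_branch all_branches)

-- ===== LEMMAS AND PROOFS =====

theorem pv_loop_eq (cb : String) (bs : List String) : ∀ (last : String),
    pvLoopA cb bs last =
      (((bs.take ((PySem.List.index? bs cb).getD bs.length)).filter
          (fun b => PySem.Str.startswith cb b)).getLast?).getD last := by
  induction bs with
  | nil => intro last; rfl
  | cons b rest ih =>
    intro last
    have hstep : pvLoopA cb (b :: rest) last =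
        (if b = cb then last
         else if PySem.Str.startswith cb b then pvLoopA cb rest b
         else pvLoopA cb rest last) := rfl
    by_cases hb : b = cb
    · subst hb
      rw [hstep, if_pos rfl, PySem.List.index?_cons_self]
      rfl
    · have hcut : (PySem.List.index? (b :: rest) cb).getD (b :: rest).length =
          ((PySem.List.index? rest cb).getD rest.length) + 1 := by
        rw [PySem.List.index?_cons_of_ne rest hb]
        cases PySem.List.index? rest cb <;> simp
      rw [hstep, if_neg hb, hcut, List.take_succ_cons]
      by_cases hp : PySem.Str.startswith cb b = true
      · rw [if_pos hp, List.filter_cons_of_pos hp, List.getLast?_cons, Option.getD_some, ih b]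
      · rw [if_neg hp, List.filter_cons_of_neg hp, ih last]

-- ===== VERDICT (by name: the statement is the Claim_ definition above) =====
theorem get_predecessor_branch_spec : Claim_equal_get_predecessor_branch := by
  intro cb bs _
  unfold Spec_get_predecessor_branch get_predecessor_branch get_predecessor_branch_alt
  rw [pv_loop_eq]; simp only [PySem.List.slice_to_natCast]
  by_cases h1 : cb = "lts" <;> by_cases h2 : cb = "cjd" <;> by_cases h3 : cb = "cjt" <;>
    by_cases h4 : cb = "cjp" <;> simp_all
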